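-- pv_equiv track=rewrite | github.com/whtierice/jug_algo | 백준/Gold/7490. 0 만들기/0 만들기.py | calculate
-- ===== SOURCE A (Python) =====
-- def calculate(cur_expr):
--     cal_expr = cur_expr.replace(' ', '')
--     cur_num = 0
--     operator = '+'
--     result = 0
--
--     for num in cal_expr + '+':
--         if num.isdigit():
--             cur_num = cur_num *10 + int(num)
--         else:
--             if operator == '+':
--                 result += cur_num
--             elif operator == '-':
--                 result -= cur_num
--
--             cur_num = 0
--             operator = num
--
--     if result == 0:
--         return True
--     else:
--         return False
-- ===== SOURCE B (Python) =====
-- def calculate(cur_expr):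
--     # Scan maximal digit runs by index; the sign of each run is the character
--     # immediately before it ('+' at the start of the string).  No accumulating
--     # digit-by-digit state machine, no appended sentinel operator.
--     s = cur_expr.replace(' ', '')
--     n = len(s)
--     total = 0
--     i = 0
--     while i < n:
--         if s[i].isdigit():
--             j = i
--             while j < n and s[j].isdigit():
--                 j += 1
--             sign = s[i - 1] if i > 0 else '+'
--             if sign == '+':
--                 total += int(s[i:j])
--             elif sign == '-':
--                 total -= int(s[i:j])
--             i = j
--         else:
--             i += 1
--     return total == 0
-- ===== Notes on version B (the rewrite author's own statement) =====
-- stated objective: alternative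
-- what changed: B finds each maximal digit run by index, converts the whole run with int() at once and signs it by the single character immediately preceding the run (start of string counts as plus), instead of A's char-by-char state machine that accumulates a number digit by digit, carries the pending operator and flushes via an appended sentinel operator.
import Mathlib
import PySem

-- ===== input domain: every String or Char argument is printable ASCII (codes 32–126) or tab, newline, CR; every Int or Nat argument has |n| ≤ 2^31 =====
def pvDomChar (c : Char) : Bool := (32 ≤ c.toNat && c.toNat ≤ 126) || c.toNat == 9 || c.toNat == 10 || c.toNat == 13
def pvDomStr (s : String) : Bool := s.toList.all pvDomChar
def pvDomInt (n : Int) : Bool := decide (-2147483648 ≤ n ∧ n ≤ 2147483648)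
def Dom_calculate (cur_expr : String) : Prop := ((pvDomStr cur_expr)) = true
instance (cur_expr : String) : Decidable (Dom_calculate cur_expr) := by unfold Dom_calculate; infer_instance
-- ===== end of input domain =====

-- B signs each maximal digit run by the character just before it instead of A's
-- digit-accumulating state machine with a pending operator; alternative decomposition, same cost.
-- ===== PORT A =====
-- one step of A's for-loop; state = (cur_num, operator, result)
def calcStepA (st : Int × Char × Int) (num : Char) : Int × Char × Int :=
  let (cur_num, operator, result) := st
  if PySem.Chars.isdigit num then
    (cur_num * 10 + ((num.toNat : Int) - 48), operator, result)  -- int(num) on a single digit char: exact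
  else
    let result := if operator = '+' then result + cur_num
                  else if operator = '-' then result - cur_num
                  else result
    (0, num, result)

def calculate (cur_expr : String) : Bool :=
  let cal_expr := PySem.Str.replace cur_expr " " ""
  let st := (cal_expr.toList ++ ['+']).foldl calcStepA (0, '+', 0)
  if st.2.2 = 0 then true else false

-- ===== PORT B =====
-- int() on a nonempty all-digit slice: exact
def altIntDigits (cs : List Char) : Int := cs.foldl (fun a c => a * 10 + ((c.toNat : Int) - 48)) 0

-- inner while loop: advance j past the digit run
def altRunEnd (l : List Char) (j : Nat) : Nat :=
  if h : j < l.length then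
    if PySem.Chars.isdigit l[j] then altRunEnd l (j + 1) else j
  else j
termination_by l.length - j

-- used by altGo's termination proof
theorem altRunEnd_ge (l : List Char) (j : Nat) : j ≤ altRunEnd l j := by
  fun_induction altRunEnd with
  | case1 j h hd ih => omega
  | case2 j h hd => omega
  | case3 j h => omega

-- outer while loop over the index i, carrying only the running total
def altGo (l : List Char) (i : Nat) (total : Int) : Int :=
  if h : i < l.length then
    if PySem.Chars.isdigit l[i] then
      let j := altRunEnd l i
      let sign := if i = 0 then '+' else l.getD (i - 1) '+'   -- s[i-1]; in range since 0 < i < len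
      let v := altIntDigits (PySem.List.slice l (some (i : Int)) (some (j : Int)))   -- int(s[i:j])
      let total := if sign = '+' then total + v
                   else if sign = '-' then total - v
                   else total
      altGo l j total
    else altGo l (i + 1) total
  else total
termination_by l.length - i
decreasing_by
  · have h1 : i + 1 ≤ altRunEnd l i := by
      unfold altRunEnd
      simp only [dif_pos, *, if_pos]
      exact altRunEnd_ge l (i + 1)
    omega
  · omega

def calculate_alt (cur_expr : String) : Bool :=
  let s := PySem.Str.replace cur_expr " " ""
  altGo s.toList 0 0 == 0

-- ===== PRECONDITION & SPEC =====
def Spec_calculate (cur_expr : String) (out : Bool) : Prop := out = calculate_alt cur_expr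
instance (cur_expr : String) (out : Bool) : Decidable (Spec_calculate cur_expr out) := by unfold Spec_calculate; infer_instance

-- ===== CLAIM (what is proved, stated in full; the proofs are below) =====
def Claim_equal_calculate : Prop := ∀ (cur_expr : String), Dom_calculate cur_expr → Spec_calculate cur_expr (calculate cur_expr)

-- ===== LEMMAS AND PROOFS =====

-- contribution of one digit run under operator/sign op (proof-side abstraction)
def pvContrib (op : Char) (v : Int) : Int := if op = '+' then v else if op = '-' then -v else 0

-- signed sum of the maximal digit runs of a list, given the char governing the next run
def pvBSum : Char → List Char → Int
  | _, [] => 0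
  | p, c :: rest =>
    if PySem.Chars.isdigit c then
      pvContrib p (altIntDigits (List.takeWhile PySem.Chars.isdigit (c :: rest)))
        + pvBSum p (List.dropWhile PySem.Chars.isdigit (c :: rest))
    else pvBSum c rest
termination_by _ l => l.length
decreasing_by
  · simp only [List.dropWhile_cons, *, if_pos, List.length_cons]
    have := List.length_dropWhile_le (p := PySem.Chars.isdigit) (l := rest)
    omega
  · simp

theorem pvBSum_head_not_digit (p q c : Char) (rest : List Char)
    (h : PySem.Chars.isdigit c = false) : pvBSum p (c :: rest) = pvBSum q (c :: rest) := by
  rw [pvBSum, pvBSum, h]; simp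

theorem pvBSum_dropWhile (p q : Char) (xs : List Char) :
    pvBSum p (List.dropWhile PySem.Chars.isdigit xs)
      = pvBSum q (List.dropWhile PySem.Chars.isdigit xs) := by
  induction xs with
  | nil => simp [List.dropWhile_nil, pvBSum]
  | cons c rest ih =>
    by_cases hd : PySem.Chars.isdigit c
    · simpa [List.dropWhile_cons, hd] using ih
    · simp only [List.dropWhile_cons, hd]
      exact pvBSum_head_not_digit p q c rest (by simpa using hd)

-- A's loop over a pure digit run just accumulates the number
theorem foldA_digits (run : List Char) (hrun : ∀ c ∈ run, PySem.Chars.isdigit c = true) :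
    ∀ cur op res, List.foldl calcStepA (cur, op, res) run
      = (run.foldl (fun a c => a * 10 + ((c.toNat : Int) - 48)) cur, op, res) := by
  induction run with
  | nil => intro cur op res; rfl
  | cons c rest ih =>
    intro cur op res
    have hc : PySem.Chars.isdigit c = true := hrun c (by simp)
    simp only [List.foldl_cons, calcStepA, hc, if_pos]
    exact ih (fun x hx => hrun x (by simp [hx])) _ op res

-- A's whole loop (with the sentinel '+') computes the signed run sum
theorem mainA : ∀ (n : Nat) (l : List Char), l.length ≤ n → ∀ op res,
    (List.foldl calcStepA (0, op, res) (l ++ ['+'])).2.2 = res + pvBSum op l := by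
  intro n
  induction n with
  | zero =>
    intro l hl op res
    have : l = [] := List.eq_nil_of_length_eq_zero (by omega)
    subst this
    have hplus : PySem.Chars.isdigit '+' = false := by decide
    simp only [List.nil_append, List.foldl_cons, List.foldl_nil, calcStepA, hplus,
      Bool.false_eq_true, if_false, pvBSum]
    split_ifs <;> simp
  | succ n ih =>
    intro l hl op res
    match l with
    | [] =>
      have hplus : PySem.Chars.isdigit '+' = false := by decide
      simp only [List.nil_append, List.foldl_cons, List.foldl_nil, calcStepA, hplus,
        Bool.false_eq_true, if_false, pvBSum]
      split_ifs <;> simp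
    | c :: rest =>
      by_cases hd : PySem.Chars.isdigit c
      · -- digit run at the head
        set run := List.takeWhile PySem.Chars.isdigit (c :: rest) with hrundef
        set rest' := List.dropWhile PySem.Chars.isdigit (c :: rest) with hrestdef
        have hsplit : run ++ rest' = c :: rest := List.takeWhile_append_dropWhile
        have hrun : ∀ x ∈ run, PySem.Chars.isdigit x = true := by
          intro x hx; exact List.mem_takeWhile_imp hx
        have hlen' : rest'.length ≤ rest.length := by
          rw [hrestdef, List.dropWhile_cons, if_pos hd]
          exact List.length_dropWhile_le _ rest
        have hfold : List.foldl calcStepA (0, op, res) ((c :: rest) ++ ['+'])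
            = List.foldl calcStepA (altIntDigits run, op, res) (rest' ++ ['+']) := by
          rw [← hsplit, List.append_assoc, List.foldl_append,
            foldA_digits run hrun 0 op res]
          rfl
        rw [hfold]
        have hbs : pvBSum op (c :: rest)
            = pvContrib op (altIntDigits run) + pvBSum op rest' := by
          rw [pvBSum, if_pos hd]
        rw [hbs]
        match hrest' : rest' with
        | [] =>
          have hplus : PySem.Chars.isdigit '+' = false := by decide
          simp only [List.nil_append, List.foldl_cons, List.foldl_nil, calcStepA, hplus,
            Bool.false_eq_true, if_false, pvBSum, pvContrib]
          split_ifs <;> simp <;> omega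
        | d :: rest'' =>
          have hdd : PySem.Chars.isdigit d = false := by
            have h2 := List.head_dropWhile_not (p := PySem.Chars.isdigit) (l := c :: rest)
              (by rw [← hrestdef]; simp)
            simpa [← hrestdef] using h2
          have hlen'' : rest''.length ≤ n := by
            simp only [List.length_cons] at hlen' hl
            omega
          simp only [List.cons_append, List.foldl_cons]
          rw [show calcStepA (altIntDigits run, op, res) d
              = (0, d, if op = '+' then res + altIntDigits run
                       else if op = '-' then res - altIntDigits run else res) by
            simp [calcStepA, hdd]]
          rw [ih rest'' hlen'' d _]
          rw [pvBSum_head_not_digit op d d rest'' hdd, pvBSum, hdd]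
          simp only [Bool.false_eq_true, if_false, pvContrib]
          split_ifs <;> omega
      · -- non-digit head: operator becomes c, nothing added
        have hstep : calcStepA (0, op, res) c = (0, c, res) := by
          simp only [calcStepA, hd, Bool.false_eq_true, if_false]
          split_ifs <;> norm_num
        simp only [List.cons_append, List.foldl_cons, hstep]
        rw [ih rest (by simpa using Nat.le_of_succ_le_succ hl) c res]
        rw [pvBSum, if_neg (by simp [hd])]

-- the char governing the run starting at index i
def pvPrev (l : List Char) (i : Nat) : Char := if i = 0 then '+' else l.getD (i - 1) '+'

theorem runEnd_spec (l : List Char) (i : Nat) :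
    altRunEnd l i = i + (List.takeWhile PySem.Chars.isdigit (l.drop i)).length := by
  fun_induction altRunEnd with
  | case1 j h hd ih =>
    rw [ih, List.drop_eq_getElem_cons h, List.takeWhile_cons, hd]
    simp; omega
  | case2 j h hd =>
    rw [List.drop_eq_getElem_cons h, List.takeWhile_cons]
    simp [hd]
  | case3 j h =>
    rw [List.drop_eq_nil_of_le (by omega)]
    simp

theorem mainB (l : List Char) (i : Nat) (total : Int) :
    altGo l i total = total + pvBSum (pvPrev l i) (l.drop i) := by
  fun_induction altGo with
  | case1 i total h hd j sign v total' ih =>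
    rw [ih]
    rw [show total' = (if sign = '+' then total + v else if sign = '-' then total - v else total)
        from rfl]
    rw [show sign = pvPrev l i from rfl]
    rw [show v = altIntDigits (PySem.List.slice l (some (i : Int)) (some ((j : Nat) : Int)))
        from rfl]
    rw [show j = altRunEnd l i from rfl]
    set run := List.takeWhile PySem.Chars.isdigit (l.drop i) with hrundef
    set rest' := List.dropWhile PySem.Chars.isdigit (l.drop i) with hrestdef
    have hdropi : l.drop i = l[i] :: l.drop (i + 1) := List.drop_eq_getElem_cons h
    have hrunpos : 0 < run.length := by
      rw [hrundef, hdropi, List.takeWhile_cons, hd]; simp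
    have hj : altRunEnd l i = i + run.length := runEnd_spec l i
    -- the slice s[i:j] is exactly the digit run
    have hslice : PySem.List.slice l (some (i : Int)) (some ((altRunEnd l i : Nat) : Int)) = run := by
      rw [PySem.List.slice_natCast, hj]
      have : i + run.length - i = run.length := by omega
      rw [this]
      have hpref : run <+: l.drop i := hrundef ▸ List.takeWhile_prefix _
      exact (List.prefix_iff_eq_take.mp hpref).symm
    -- the tail after the run is the drop at j
    have hdropj : l.drop (altRunEnd l i) = rest' := by
      rw [hj, ← List.drop_drop]
      conv_lhs => rw [show l.drop i = run ++ rest' from List.takeWhile_append_dropWhile.symm]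
      rw [List.drop_left]
    -- B-sum at i unfolds on the digit head
    have hbs : pvBSum (pvPrev l i) (l.drop i)
        = pvContrib (pvPrev l i) (altIntDigits run) + pvBSum (pvPrev l i) rest' := by
      rw [hdropi, pvBSum, hd]
      simp only [if_pos]
      rw [← hdropi, ← hrundef, ← hrestdef]
    rw [hbs, hdropj]
    rw [hrestdef, pvBSum_dropWhile (pvPrev l (altRunEnd l i)) (pvPrev l i), ← hrestdef]
    rw [hslice]
    simp only [pvPrev, pvContrib]
    split_ifs <;> omega
  | case2 i total h hd ih =>
    rw [ih, List.drop_eq_getElem_cons h]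
    rw [pvBSum_head_not_digit (pvPrev l i) (pvPrev l (i + 1)) _ _ (by simpa using hd)]
    rw [pvBSum, (by simpa using hd : PySem.Chars.isdigit l[i] = false)]
    simp only [Bool.false_eq_true, if_false]
    congr 1
    simp [pvPrev, List.getD_eq_getElem?_getD, h]
  | case3 i total h =>
    rw [List.drop_eq_nil_of_le (by omega), pvBSum]
    omega

-- ===== VERDICT (by name: the statement is the Claim_ definition above) =====
-- both programs reduce to the signed run sum of the stripped char list
theorem pvKey (L : List Char) :
    (if (List.foldl calcStepA (0, '+', 0) (L ++ ['+'])).2.2 = 0 then true else false)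
      = (altGo L 0 0 == 0) := by
  rw [mainA L.length L le_rfl '+' 0, mainB L 0 0]
  simp [pvPrev]
  by_cases h : pvBSum '+' L = 0 <;> simp [h]

-- ===== VERDICT (by name: the statement is the Claim_ definition above) =====
theorem calculate_spec : Claim_equal_calculate := by
  intro s _
  show calculate s = calculate_alt s
  exact pvKey ((PySem.Str.replace s " " "").toList)
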